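-- pv_equiv track=rewrite | github.com/eugene-kim806/3DVWS_2025 | src/data_preprocessing/split_data.py | split_patients
-- ===== SOURCE A (Python) =====
-- def split_patients(patient_timepoints, num_folds:int):
--     """
--     Distributes patients into balanced folds based on timepoints.
--     """
--     # Sort the list of (patient ID, number of timepoints) based on the number of timepoints in descending order
--     patients = sorted(patient_timepoints.items(), key=lambda x: x[1], reverse=True)
--     folds = [[] for _ in range(num_folds)]  # e.g., [[fold 1], [fold 2], [fold 3], [fold 4], [fold 5]]
--     fold_timepoints = [0] * num_folds  # e.g., [0, 0, 0, 0, 0]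
--
--     for patient_ID, timepoints in patients:  # e.g., ('BraTS-GLI-00005', 2)
--         min_fold_idx = fold_timepoints.index(min(fold_timepoints))  # index of the fold with minimum timepoints
--         folds[min_fold_idx].append(patient_ID)
--         fold_timepoints[min_fold_idx] += timepoints
--
--     return folds, fold_timepoints  # fold_timepoints = [325, 324, 324, 324, 324]
-- ===== SOURCE B (Python) =====
-- import bisect
--
-- def split_patients(patient_timepoints, num_folds: int):
--     """Distributes patients into balanced folds based on timepoints.
--
--     Keeps a pool of (load, fold_index) pairs sorted lexicographically; the head
--     of the pool is always the least-loaded fold with the smallest index, so the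
--     per-patient scan for the minimum disappears.
--     """
--     patients = sorted(patient_timepoints.items(), key=lambda x: x[1], reverse=True)
--     folds = [[] for _ in range(num_folds)]
--     fold_timepoints = [0] * num_folds
--     pool = [(0, i) for i in range(num_folds)]  # sorted (load, fold index)
--     for patient_ID, timepoints in patients:
--         load, idx = pool.pop(0)
--         folds[idx].append(patient_ID)
--         new_load = load + timepoints
--         fold_timepoints[idx] = new_load
--         bisect.insort(pool, (new_load, idx))
--     return folds, fold_timepoints
-- ===== Notes on version B (the rewrite author's own statement) =====
-- stated objective: faster
-- what changed: Replaces A's per-patient double scan of the load list (min + list.index) with a pool of (load, fold_index) pairs kept sorted by bisect.insort, whose head is always the least-loaded fold with the smallest index.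
-- outside the precondition, e.g. on split_patients({'a': 2}, 0): A raises ValueError, B raises IndexError
import Mathlib
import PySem

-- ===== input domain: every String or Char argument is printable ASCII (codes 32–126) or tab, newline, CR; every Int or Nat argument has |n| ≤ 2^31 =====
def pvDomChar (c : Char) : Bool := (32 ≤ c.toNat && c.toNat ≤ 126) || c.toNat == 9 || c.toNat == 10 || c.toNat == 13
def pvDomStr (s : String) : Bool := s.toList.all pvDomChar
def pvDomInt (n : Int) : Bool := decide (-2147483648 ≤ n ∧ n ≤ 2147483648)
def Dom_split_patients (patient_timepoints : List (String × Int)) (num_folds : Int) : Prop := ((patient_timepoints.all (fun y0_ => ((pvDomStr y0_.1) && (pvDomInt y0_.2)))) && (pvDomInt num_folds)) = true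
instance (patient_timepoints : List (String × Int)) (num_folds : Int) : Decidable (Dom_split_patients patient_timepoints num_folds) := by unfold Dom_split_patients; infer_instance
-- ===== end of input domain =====

-- B replaces A's per-patient min+index double scan of the load list by a pool of (load, fold)
-- pairs kept sorted lexicographically, whose head is always the target fold (objective: faster; measurably so in a timing run).

-- ===== PORT A =====
def split_patients (patient_timepoints : List (String × Int)) (num_folds : Int) : List (List String) × List Int :=
  let patients := PySem.List.sorted (PySem.Dict.ofList patient_timepoints).items (fun x => x.2) true
  let folds : List (List String) := (PySem.List.pyRange 0 num_folds 1).map (fun _ => [])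
  let fold_timepoints : List Int := List.replicate num_folds.toNat 0
  patients.foldl
    (fun st pt =>
      match PySem.List.min? st.2 (fun y => y) with
      | none => st        -- unreachable under Pre_: min([]) raises ValueError
      | some m =>
        match PySem.List.index? st.2 m with
        | none => st      -- unreachable: m ∈ st.2
        | some j =>
          (st.1.set j (st.1.getD j [] ++ [pt.1]), st.2.set j (st.2.getD j 0 + pt.2)))
    (folds, fold_timepoints)

-- ===== PORT B =====
-- bisect.insort on a lex-sorted list: the resulting list places x before the first strictly
-- lex-greater element, exactly bisect_right's insertion point (exact, hand-ported).
def pvInsort (x : Int × Int) : List (Int × Int) → List (Int × Int)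
  | [] => [x]
  | y :: ys =>
    if x.1 < y.1 ∨ (x.1 = y.1 ∧ x.2 < y.2) then x :: y :: ys else y :: pvInsort x ys

def split_patients_alt (patient_timepoints : List (String × Int)) (num_folds : Int) : List (List String) × List Int :=
  let patients := PySem.List.sorted (PySem.Dict.ofList patient_timepoints).items (fun x => x.2) true
  let folds : List (List String) := (PySem.List.pyRange 0 num_folds 1).map (fun _ => [])
  let fold_timepoints : List Int := List.replicate num_folds.toNat 0
  let pool : List (Int × Int) := (PySem.List.pyRange 0 num_folds 1).map (fun i => (0, i))
  (patients.foldl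
    (fun (st : (List (List String) × List Int) × List (Int × Int)) pt =>
      match st.2 with
      | [] => st          -- unreachable under Pre_: pool.pop(0) raises IndexError
      | (load, idx) :: rest =>
        let nl := load + pt.2
        ((PySem.List.pySetD st.1.1 idx (PySem.List.pyGetD st.1.1 idx [] ++ [pt.1]),
          PySem.List.pySetD st.1.2 idx nl),
         pvInsort (nl, idx) rest))
    ((folds, fold_timepoints), pool)).1

-- ===== PRECONDITION & SPEC =====
-- Pre_ excludes num_folds < 1 with a nonempty input, where A raises ValueError (min of an empty list).
def Pre_split_patients (patient_timepoints : List (String × Int)) (num_folds : Int) : Prop :=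
  patient_timepoints = [] ∨ 1 ≤ num_folds
instance (patient_timepoints : List (String × Int)) (num_folds : Int) : Decidable (Pre_split_patients patient_timepoints num_folds) := by unfold Pre_split_patients; infer_instance
def pvWitness_split_patients : (List (String × Int)) × Int := ([("a", 2), ("b", 1), ("c", 3)], 2)

def Spec_split_patients (patient_timepoints : List (String × Int)) (num_folds : Int) (out : List (List String) × List Int) : Prop := out = split_patients_alt patient_timepoints num_folds
instance (patient_timepoints : List (String × Int)) (num_folds : Int) (out : List (List String) × List Int) : Decidable (Spec_split_patients patient_timepoints num_folds out) := by unfold Spec_split_patients; infer_instance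

-- ===== CLAIM (what is proved, stated in full; the proofs are below) =====
def Claim_equal_split_patients : Prop := ∀ (patient_timepoints : List (String × Int)) (num_folds : Int), Dom_split_patients patient_timepoints num_folds → Pre_split_patients patient_timepoints num_folds → Spec_split_patients patient_timepoints num_folds (split_patients patient_timepoints num_folds)

-- ===== LEMMAS AND PROOFS =====

-- the pool that mirrors a load list ft: its entries (ft[j], j), in index order
def poolOf (ft : List Int) : List (Int × Int) :=
  (List.range ft.length).map (fun j => (ft.getD j 0, (j : Int)))

def lexLe (a b : Int × Int) : Prop := a.1 < b.1 ∨ (a.1 = b.1 ∧ a.2 ≤ b.2)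

def PoolInv (ft : List Int) (pool : List (Int × Int)) : Prop :=
  pool.Pairwise lexLe ∧ pool.Perm (poolOf ft)

theorem pvInsort_perm (x : Int × Int) (l : List (Int × Int)) : (pvInsort x l).Perm (x :: l) := by
  induction l with
  | nil => simp [pvInsort]
  | cons y ys ih =>
    simp only [pvInsort]
    split
    · exact List.Perm.refl _
    · exact (List.Perm.cons y ih).trans (List.Perm.swap x y ys)

theorem pvInsort_pairwise (x : Int × Int) (l : List (Int × Int))
    (h : l.Pairwise lexLe) : (pvInsort x l).Pairwise lexLe := by
  induction l with
  | nil => simp [pvInsort, lexLe]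
  | cons y ys ih =>
    rcases List.pairwise_cons.mp h with ⟨hy, hys⟩
    simp only [pvInsort]
    split
    · rename_i hlt
      refine List.pairwise_cons.mpr ⟨?_, h⟩
      intro z hz
      rcases List.mem_cons.mp hz with hz | hz
      · subst hz; unfold lexLe; rcases hlt with h1 | ⟨h1, h2⟩
        · exact Or.inl h1
        · exact Or.inr ⟨h1, le_of_lt h2⟩
      · have := hy z hz
        unfold lexLe at this ⊢
        rcases hlt with h1 | ⟨h1, h2⟩ <;> rcases this with t1 | ⟨t1, t2⟩ <;> omega
    · rename_i hnlt
      refine List.pairwise_cons.mpr ⟨?_, ih hys⟩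
      intro z hz
      have hz' := (pvInsort_perm x ys).mem_iff.mp hz
      rcases List.mem_cons.mp hz' with hz' | hz'
      · subst hz'; unfold lexLe; push Not at hnlt; omega
      · exact hy z hz'

theorem length_poolOf (ft : List Int) : (poolOf ft).length = ft.length := by
  simp [poolOf]

theorem getElem_poolOf (ft : List Int) (j : Nat) (hj : j < ft.length) :
    (poolOf ft)[j]'(by simp [length_poolOf]; omega) = (ft[j], (j : Int)) := by
  simp [poolOf, List.getD_eq_getElem?_getD, List.getElem?_eq_getElem hj]

theorem mem_poolOf (ft : List Int) (p : Int × Int) :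
    p ∈ poolOf ft ↔ ∃ (j : Nat) (hj : j < ft.length), p = (ft[j], (j : Int)) := by
  constructor
  · intro hp
    rcases List.getElem_of_mem hp with ⟨j, hj, hpj⟩
    have hj' : j < ft.length := by simpa [length_poolOf] using hj
    exact ⟨j, hj', by rw [← hpj, getElem_poolOf ft j hj']⟩
  · rintro ⟨j, hj, rfl⟩
    have : (poolOf ft)[j]'(by simp [length_poolOf]; omega) ∈ poolOf ft := List.getElem_mem _
    rwa [getElem_poolOf ft j hj] at this

-- head of a sorted pool = (min of ft, its first index)
theorem pool_head (ft : List Int) (m i : Int) (rest : List (Int × Int))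
    (hinv : PoolInv ft ((m, i) :: rest)) :
    PySem.List.min? ft (fun y => y) = some m ∧
    PySem.List.index? ft m = some i.toNat ∧
    0 ≤ i ∧ i.toNat < ft.length ∧ ft.getD i.toNat 0 = m := by
  obtain ⟨hsort, hperm⟩ := hinv
  have hrest : ∀ z ∈ rest, lexLe (m, i) z := (List.pairwise_cons.mp hsort).1
  obtain ⟨j, hj, hji⟩ := (mem_poolOf ft (m, i)).mp (hperm.mem_iff.mp (List.mem_cons_self))
  have hm : ft[j] = m := (congrArg Prod.fst hji).symm
  have hij : i = (j : Int) := congrArg Prod.snd hji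
  have h0i : 0 ≤ i := by omega
  have hiN : i.toNat = j := by omega
  have hmin : ∀ y ∈ ft, m ≤ y := by
    intro y hy
    obtain ⟨j', hj', hy'⟩ := List.getElem_of_mem hy
    have hmem' : (y, (j' : Int)) ∈ poolOf ft := (mem_poolOf ft _).mpr ⟨j', hj', by rw [hy']⟩
    rcases List.mem_cons.mp (hperm.symm.mem_iff.mp hmem') with h | h
    · have := congrArg Prod.fst h; simp only at this; omega
    · have := hrest _ h; unfold lexLe at this; simp only at this; omega
  have hne : ft ≠ [] := by intro h; subst h; simp at hj
  have hminq : PySem.List.min? ft (fun y => y) = some m := by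
    cases hmo : PySem.List.min? ft (fun y => y) with
    | none => exact absurd ((PySem.List.min?_eq_none_iff ft _).mp hmo) hne
    | some m0 =>
      have h1 : m0 ∈ ft := PySem.List.min?_mem hmo
      have h2 := PySem.List.min?_isMin hmo
      have hmft : m ∈ ft := hm ▸ List.getElem_mem hj
      rw [le_antisymm (h2 m hmft) (hmin m0 h1)]
  have hfirst : ∀ j', j' < j → ∀ (hlt : j' < ft.length), ft[j'] ≠ m := by
    intro j' hlt hlt' heq
    have hmem' : (m, (j' : Int)) ∈ poolOf ft := (mem_poolOf ft _).mpr ⟨j', hlt', by rw [heq]⟩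
    rcases List.mem_cons.mp (hperm.symm.mem_iff.mp hmem') with h | h
    · have := congrArg Prod.snd h; simp only at this; omega
    · have := hrest _ h; unfold lexLe at this; simp only at this; omega
  have hidx : PySem.List.index? ft m = some j := by
    rw [PySem.List.index?_eq_some_iff]
    refine ⟨ft.take j, ft.drop (j + 1), ?_, by simp [hj.le], ?_⟩
    · conv_lhs => rw [← List.take_append_drop j ft]
      rw [← List.getElem_cons_drop hj, hm]
    · intro hmemtake
      obtain ⟨j', hj', hv⟩ := List.getElem_of_mem hmemtake
      have hjlen : j' < j := by simpa using (List.length_take_le j ft).trans_lt' hj'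
      rw [List.getElem_take] at hv
      exact hfirst j' hjlen (by omega) hv
  exact ⟨hminq, by rw [hiN]; exact hidx, h0i, by omega, by
    rw [List.getD_eq_getElem?_getD, List.getElem?_eq_getElem (by omega : i.toNat < ft.length)]
    simp [hiN, hm]⟩

theorem poolOf_eq_set (ft : List Int) (n : Nat) (v : Int) (_hn : n < ft.length) :
    poolOf (ft.set n v) = (poolOf ft).set n (v, (n : Int)) := by
  apply List.ext_getElem
  · simp [length_poolOf]
  · intro j h1 h2
    have hj : j < ft.length := by simpa [length_poolOf] using h2
    rw [getElem_poolOf _ j (by simpa using hj), List.getElem_set,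
      List.getElem_set (by simpa [length_poolOf] using hj), getElem_poolOf ft j hj]
    by_cases h : n = j <;> simp [h]

theorem poolOf_set (ft : List Int) (n : Nat) (v : Int) (hn : n < ft.length) :
    (poolOf (ft.set n v)).Perm ((v, (n : Int)) :: (poolOf ft).eraseIdx n) := by
  rw [poolOf_eq_set ft n v hn]
  exact List.set_perm_cons_eraseIdx (by simpa [length_poolOf] using hn) _

theorem pool_step (ft : List Int) (m i : Int) (rest : List (Int × Int)) (tp : Int)
    (hinv : PoolInv ft ((m, i) :: rest)) :
    PoolInv (ft.set i.toNat (m + tp)) (pvInsort (m + tp, i) rest) := by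
  obtain ⟨-, -, h0i, hiN, hgd⟩ := pool_head ft m i rest hinv
  obtain ⟨hsort, hperm⟩ := hinv
  have hlen : i.toNat < (poolOf ft).length := by rw [length_poolOf]; exact hiN
  have hheadeq : (poolOf ft)[i.toNat] = (m, i) := by
    rw [getElem_poolOf ft _ hiN]
    have : ft[i.toNat] = m := by
      rw [List.getD_eq_getElem?_getD, List.getElem?_eq_getElem hiN] at hgd; simpa using hgd
    rw [this]
    congr 1
    omega
  refine ⟨pvInsort_pairwise _ _ (List.pairwise_cons.mp hsort).2, ?_⟩
  have hr : rest.Perm ((poolOf ft).eraseIdx i.toNat) := by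
    have h2 : ((m, i) :: rest).Perm ((m, i) :: (poolOf ft).eraseIdx i.toNat) := by
      refine hperm.trans ?_
      have := (List.getElem_cons_eraseIdx_perm hlen).symm
      rwa [hheadeq] at this
    exact h2.cons_inv
  refine ((pvInsort_perm _ _).trans (hr.cons _)).trans ?_
  have := (poolOf_set ft i.toNat (m + tp) hiN).symm
  have hcast : ((i.toNat : Int)) = i := by omega
  rwa [hcast] at this

-- the two loops, run from equal states with the pool invariant, agree
theorem loop_eq (patients : List (String × Int)) :
    ∀ (folds : List (List String)) (ft : List Int) (pool : List (Int × Int)),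
    ft ≠ [] → PoolInv ft pool →
    patients.foldl
      (fun st pt =>
        match PySem.List.min? st.2 (fun y => y) with
        | none => st
        | some m =>
          match PySem.List.index? st.2 m with
          | none => st
          | some j =>
            (st.1.set j (st.1.getD j [] ++ [pt.1]), st.2.set j (st.2.getD j 0 + pt.2)))
      (folds, ft)
    = (patients.foldl
        (fun (st : (List (List String) × List Int) × List (Int × Int)) pt =>
          match st.2 with
          | [] => st
          | (load, idx) :: rest =>
            let nl := load + pt.2
            ((PySem.List.pySetD st.1.1 idx (PySem.List.pyGetD st.1.1 idx [] ++ [pt.1]),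
              PySem.List.pySetD st.1.2 idx nl),
             pvInsort (nl, idx) rest))
        ((folds, ft), pool)).1 := by
  induction patients with
  | nil => intro folds ft pool _ _; rfl
  | cons pt ps ih =>
    intro folds ft pool hne hinv
    cases pool with
    | nil =>
      exfalso
      have hl := hinv.2.length_eq
      simp only [List.length_nil, length_poolOf] at hl
      exact hne (List.length_eq_zero_iff.mp hl.symm)
    | cons hd rest =>
      obtain ⟨m, i⟩ := hd
      obtain ⟨hmin, hidx, h0i, hiN, hgd⟩ := pool_head ft m i rest hinv
      simp only [List.foldl_cons, hmin, hidx]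
      rw [PySem.List.pySetD_of_nonneg folds _ h0i, PySem.List.pySetD_of_nonneg ft _ h0i,
        PySem.List.pyGetD_of_nonneg folds _ h0i, hgd]
      exact ih _ _ _ (by simp only [ne_eq, List.ne_nil_iff_length_pos, List.length_set]; omega) (pool_step ft m i rest pt.2 hinv)

-- ===== VERDICT (by name: the statement is the Claim_ definition above) =====
theorem pyRange_map_pair (nf : Int) :
    (PySem.List.pyRange 0 nf 1).map (fun i => ((0 : Int), i))
      = poolOf (List.replicate nf.toNat 0) := by
  rw [PySem.List.pyRange_one]
  unfold poolOf
  rw [List.map_map]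
  simp only [Int.sub_zero, List.length_replicate]
  apply List.map_congr_left
  intro j hj
  have hjk : j < nf.toNat := by simpa using List.mem_range.mp hj
  simp [List.getD_eq_getElem?_getD, hjk]

theorem init_inv (nf : Int) :
    PoolInv (List.replicate nf.toNat 0) ((PySem.List.pyRange 0 nf 1).map (fun i => ((0 : Int), i))) := by
  constructor
  · apply List.Pairwise.map
    · intro a b hab
      exact Or.inr ⟨rfl, le_of_lt hab⟩
    · exact PySem.List.pairwise_lt_pyRange_one 0 nf
  · rw [pyRange_map_pair]

theorem split_patients_spec : Claim_equal_split_patients := by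
  unfold Claim_equal_split_patients Spec_split_patients
  intro pts nf _ hpre
  unfold split_patients split_patients_alt
  rcases hpre with hpre | hpre
  · subst hpre; rfl
  · exact loop_eq _ _ _ _
      (by simp only [ne_eq, List.ne_nil_iff_length_pos, List.length_replicate]; omega)
      (init_inv nf)
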